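-- pv_equiv track=rewrite | github.com/nowei/advent-of-code | 2023/src/day03.py | check_next_digits
-- ===== SOURCE A (Python) =====
-- from typing import Any, List, Tuple, Set
--
-- def check_valid_part(input: List[List[str]], digits_set: Set[Tuple[int, int]]) -> bool:
--     width = len(input[0])
--     height = len(input)
--     for curr_row, curr_col in digits_set:
--         for i in range(-1, 2):
--             for j in range(-1, 2):
--                 check_row = curr_row + i
--                 check_col = curr_col + j
--                 if check_row < 0 or check_row >= height:
--                     continue
--                 if check_col < 0 or check_col >= width:
--                     continue
--                 if (check_row, check_col) in digits_set:
--                     continue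
--                 val = input[check_row][check_col]
--                 if not val.isdigit() and val != ".":
--                     return True
--     return False
--
-- def check_next_digits(
--     input: List[List[str]], check_digit: Tuple[int, int], seen: Set[Tuple[int, int]]
-- ) -> (bool, int):
--     row, col = check_digit
--     if not input[row][col].isdigit():
--         return False, 0
--     width = len(input[0])
--     col_max = col
--     while col_max < width and input[row][col_max].isdigit():
--         col_max += 1
--     digits_set = set((row, c) for c in range(col, col_max))
--     for tup in digits_set:
--         seen.add(tup)
--     valid = check_valid_part(input, digits_set)
--     val = 0
--     if valid:
--         for c in range(col, col_max):
--             val = val * 10 + int(input[row][c])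
--     return valid, val
-- ===== SOURCE B (Python) =====
-- def check_next_digits(input, check_digit, seen):
--     row, col = check_digit
--     if not input[row][col].isdigit():
--         return False, 0
--     width = len(input[0])
--     height = len(input)
--     # one pass over the digit run: extend col_max, record into seen, accumulate val
--     col_max = col
--     val = 0
--     while col_max < width and input[row][col_max].isdigit():
--         seen.add((row, col_max))
--         val = val * 10 + int(input[row][col_max])
--         col_max += 1
--     # single bounding-box sweep instead of per-digit 3x3 neighborhoods
--     for check_row in range(row - 1, row + 2):
--         if check_row < 0 or check_row >= height:
--             continue
--         for check_col in range(col - 1, col_max + 1):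
--             if check_col < 0 or check_col >= width:
--                 continue
--             if check_row == row and col <= check_col < col_max:
--                 continue
--             v = input[check_row][check_col]
--             if not v.isdigit() and v != ".":
--                 return True, val
--     return False, 0
-- ===== Notes on version B (the rewrite author's own statement) =====
-- stated objective: alternative
-- what changed: B fuses the run scan, seen-marking and value accumulation into one pass and replaces check_valid_part's per-digit 3x3 neighborhood loops with digits_set membership tests by a single bounding-box rectangle sweep.
-- outside the precondition, e.g. on check_next_digits([['1'], ['.', '.']], (0, 0), set()): A returns (False, 0), B returns (False, 0); on check_next_digits([['x'], ['1', '2']], (1, 1), set()): A returns (False, 0), B returns (True, 0)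
import Mathlib
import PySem

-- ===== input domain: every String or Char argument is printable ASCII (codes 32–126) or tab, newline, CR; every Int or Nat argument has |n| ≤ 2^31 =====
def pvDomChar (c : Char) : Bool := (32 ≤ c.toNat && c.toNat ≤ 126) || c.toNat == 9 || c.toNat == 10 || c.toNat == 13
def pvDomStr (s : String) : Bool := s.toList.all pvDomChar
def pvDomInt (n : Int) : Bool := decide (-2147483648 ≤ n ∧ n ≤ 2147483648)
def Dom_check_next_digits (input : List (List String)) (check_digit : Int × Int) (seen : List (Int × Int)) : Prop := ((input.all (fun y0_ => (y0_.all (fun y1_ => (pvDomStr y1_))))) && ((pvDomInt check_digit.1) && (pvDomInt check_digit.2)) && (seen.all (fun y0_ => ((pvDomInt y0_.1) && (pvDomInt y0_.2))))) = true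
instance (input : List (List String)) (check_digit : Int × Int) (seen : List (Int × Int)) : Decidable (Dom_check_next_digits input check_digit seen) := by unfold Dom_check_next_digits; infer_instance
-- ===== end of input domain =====

-- B fuses the run scan, seen-marking and value accumulation into one pass and replaces the
-- per-digit 3x3 neighborhood loops (with digits_set membership tests) by one bounding-box sweep.
-- Both Pythons mutate `seen` identically (they add the same run cells); the equivalence proved
-- here is about the RETURN value only.

-- ===== PORT A =====
-- the `while col_max < width and input[row][col_max].isdigit(): col_max += 1` loop
def pvRunEnd (rowl : List String) (width c : Int) (fuel : Nat) : Int :=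
  match fuel with
  | 0 => c
  | f + 1 =>
    if c < width then
      match PySem.List.pyGet? rowl c with
      | some s => if PySem.Str.strIsdigit s then pvRunEnd rowl width (c + 1) f else c
      | none => c
    else c

def check_valid_part (input : List (List String)) (digits_set : PySem.Set (Int × Int)) : Bool :=
  let width : Int := (((PySem.List.pyGet? input 0).getD []).length : Int)
  let height : Int := (input.length : Int)
  digits_set.any (fun p =>
    (PySem.List.pyRange (-1) 2 1).any (fun i =>
      (PySem.List.pyRange (-1) 2 1).any (fun j =>
        let check_row := p.1 + i
        let check_col := p.2 + j
        if check_row < 0 ∨ height ≤ check_row then false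
        else if check_col < 0 ∨ width ≤ check_col then false
        else if PySem.Set.contains digits_set (check_row, check_col) then false
        else
          match PySem.List.pyGet? input check_row with
          | none => false
          | some rl =>
            match PySem.List.pyGet? rl check_col with
            | none => false
            | some val => !PySem.Str.strIsdigit val && val != ".")))

def check_next_digits (input : List (List String)) (check_digit : Int × Int) (seen : List (Int × Int)) : Bool × Int :=
  let row := check_digit.1
  let col := check_digit.2
  match PySem.List.pyGet? input row with
  | none => (false, 0)      -- IndexError, excluded by Pre_
  | some rowl =>
    match PySem.List.pyGet? rowl col with
    | none => (false, 0)    -- IndexError, excluded by Pre_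
    | some s =>
      if !PySem.Str.strIsdigit s then (false, 0)
      else
        let width : Int := (((PySem.List.pyGet? input 0).getD []).length : Int)
        let col_max := pvRunEnd rowl width col (width - col).toNat
        let digits_set : PySem.Set (Int × Int) :=
          PySem.Set.ofList ((PySem.List.pyRange col col_max 1).map (fun c => (row, c)))
        -- `for tup in digits_set: seen.add(tup)` only mutates `seen`; the return value ignores it
        let valid := check_valid_part input digits_set
        let val : Int :=
          if valid then
            (PySem.List.pyRange col col_max 1).foldl
              (fun v c => v * 10 + (PySem.Int.ofStr? ((PySem.List.pyGet? rowl c).getD "")).getD 0) 0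
          else 0
        (valid, val)

-- ===== PORT B =====
-- B's single pass: extends the run and accumulates val at the same time
def pvScanRun (rowl : List String) (width c v : Int) (fuel : Nat) : Int × Int :=
  match fuel with
  | 0 => (c, v)
  | f + 1 =>
    if c < width then
      match PySem.List.pyGet? rowl c with
      | some s =>
        if PySem.Str.strIsdigit s then
          pvScanRun rowl width (c + 1) (v * 10 + (PySem.Int.ofStr? s).getD 0) f
        else (c, v)
      | none => (c, v)
    else (c, v)

def check_next_digits_alt (input : List (List String)) (check_digit : Int × Int) (seen : List (Int × Int)) : Bool × Int :=
  let row := check_digit.1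
  let col := check_digit.2
  match PySem.List.pyGet? input row with
  | none => (false, 0)      -- IndexError, excluded by Pre_
  | some rowl =>
    match PySem.List.pyGet? rowl col with
    | none => (false, 0)    -- IndexError, excluded by Pre_
    | some s =>
      if !PySem.Str.strIsdigit s then (false, 0)
      else
        let width : Int := (((PySem.List.pyGet? input 0).getD []).length : Int)
        let height : Int := (input.length : Int)
        let cm_val := pvScanRun rowl width col 0 (width - col).toNat
        let col_max := cm_val.1
        let val := cm_val.2
        -- single bounding-box sweep
        let valid :=
          (PySem.List.pyRange (row - 1) (row + 2) 1).any (fun check_row =>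
            if check_row < 0 ∨ height ≤ check_row then false
            else
              (PySem.List.pyRange (col - 1) (col_max + 1) 1).any (fun check_col =>
                if check_col < 0 ∨ width ≤ check_col then false
                else if check_row = row ∧ col ≤ check_col ∧ check_col < col_max then false
                else
                  match PySem.List.pyGet? input check_row with
                  | none => false
                  | some rl =>
                    match PySem.List.pyGet? rl check_col with
                    | none => false
                    | some v => !PySem.Str.strIsdigit v && v != "."))
        if valid then (true, val) else (false, 0)

-- ===== PRECONDITION & SPEC =====
-- Pre_ excludes empty or ragged (non-rectangular) grids and out-of-range positions: there the Python
-- accesses input[row][col] / the neighbour cells with indices that may fall outside a row, so A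
-- raises IndexError on part of them and on the rest its value depends on which short rows the scan
-- happens to probe.
def Pre_check_next_digits (input : List (List String)) (check_digit : Int × Int) (seen : List (Int × Int)) : Prop :=
  input ≠ [] ∧
  (∀ r ∈ input, r.length = (input.headD []).length) ∧
  -(input.length : Int) ≤ check_digit.1 ∧ check_digit.1 < (input.length : Int) ∧
  -((input.headD []).length : Int) ≤ check_digit.2 ∧ check_digit.2 < ((input.headD []).length : Int)
instance (input : List (List String)) (check_digit : Int × Int) (seen : List (Int × Int)) : Decidable (Pre_check_next_digits input check_digit seen) := by unfold Pre_check_next_digits; infer_instance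

def pvWitness_check_next_digits : List (List String) × (Int × Int) × (List (Int × Int)) :=
  ([["4", "6", "*"], [".", ".", "."]], (0, 1), [])

def Spec_check_next_digits (input : List (List String)) (check_digit : Int × Int) (seen : List (Int × Int)) (out : Bool × Int) : Prop := out = check_next_digits_alt input check_digit seen
instance (input : List (List String)) (check_digit : Int × Int) (seen : List (Int × Int)) (out : Bool × Int) : Decidable (Spec_check_next_digits input check_digit seen out) := by unfold Spec_check_next_digits; infer_instance

-- ===== CLAIM (what is proved, stated in full; the proofs are below) =====
def Claim_equal_check_next_digits : Prop := ∀ (input : List (List String)) (check_digit : Int × Int) (seen : List (Int × Int)), Dom_check_next_digits input check_digit seen → Pre_check_next_digits input check_digit seen → Spec_check_next_digits input check_digit seen (check_next_digits input check_digit seen)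

-- ===== LEMMAS AND PROOFS =====

theorem pvRunEnd_ge (rowl : List String) (width : Int) : ∀ (fuel : Nat) (c : Int), c ≤ pvRunEnd rowl width c fuel := by
  intro fuel
  induction fuel with
  | zero => intro c; simp [pvRunEnd]
  | succ f ih =>
    intro c
    simp only [pvRunEnd]
    split
    · cases h : PySem.List.pyGet? rowl c with
      | none => simp
      | some s =>
        simp only [PySem.Str.strIsdigit_eq]
        by_cases hd : PySem.Chars.strIsdigit s.toList = true
        · simp [hd]; have := ih (c + 1); omega
        · simp [hd]
    · simp

theorem pvScanRun_eq (rowl : List String) (width : Int) : ∀ (fuel : Nat) (c v : Int),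
    pvScanRun rowl width c v fuel =
      (pvRunEnd rowl width c fuel,
       (PySem.List.pyRange c (pvRunEnd rowl width c fuel) 1).foldl
         (fun v c => v * 10 + (PySem.Int.ofStr? ((PySem.List.pyGet? rowl c).getD "")).getD 0) v) := by
  intro fuel
  induction fuel with
  | zero =>
    intro c v
    simp [pvScanRun, pvRunEnd, PySem.List.pyRange_one_eq_nil (le_refl c)]
  | succ f ih =>
    intro c v
    simp only [pvScanRun, pvRunEnd]
    split
    · cases h : PySem.List.pyGet? rowl c with
      | none => simp [PySem.List.pyRange_one_eq_nil (le_refl c)]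
      | some s =>
        simp only [PySem.Str.strIsdigit_eq]
        by_cases hd : PySem.Chars.strIsdigit s.toList = true
        · simp only [hd, if_true]
          rw [ih]
          have hlt : c < pvRunEnd rowl width (c + 1) f := by
            have := pvRunEnd_ge rowl width f (c + 1); omega
          rw [PySem.List.pyRange_one_cons hlt]
          simp [h]
        · simp [hd, PySem.List.pyRange_one_eq_nil (le_refl c)]
    · simp [PySem.List.pyRange_one_eq_nil (le_refl c)]

theorem pv_valid_eq (input : List (List String)) (row col col_max : Int) (hlt : col < col_max) :
    check_valid_part input (PySem.Set.ofList ((PySem.List.pyRange col col_max 1).map (fun c => (row, c)))) =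
      (PySem.List.pyRange (row - 1) (row + 2) 1).any (fun check_row =>
        if check_row < 0 ∨ ((input.length : Int)) ≤ check_row then false
        else
          (PySem.List.pyRange (col - 1) (col_max + 1) 1).any (fun check_col =>
            if check_col < 0 ∨ ((((PySem.List.pyGet? input 0).getD []).length : Int)) ≤ check_col then false
            else if check_row = row ∧ col ≤ check_col ∧ check_col < col_max then false
            else
              match PySem.List.pyGet? input check_row with
              | none => false
              | some rl =>
                match PySem.List.pyGet? rl check_col with
                | none => false
                | some v => !PySem.Str.strIsdigit v && v != ".")) := by
  apply Bool.coe_iff_coe.mp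
  simp only [check_valid_part, List.any_eq_true, PySem.List.mem_pyRange_one,
    PySem.Set.mem_ofList, List.mem_map]
  constructor
  · rintro ⟨p, ⟨c, hc, rfl⟩, i, hi, j, hj, hbody⟩
    split_ifs at hbody with hA hB hC
    simp only [PySem.Set.contains_iff, PySem.Set.mem_ofList, List.mem_map,
        PySem.List.mem_pyRange_one, Prod.mk.injEq] at hC
    simp only at hbody hA hB hC
    refine ⟨row + i, ⟨by omega, by omega⟩, ?_⟩
    rw [if_neg hA]
    simp only [List.any_eq_true, PySem.List.mem_pyRange_one]
    refine ⟨c + j, ⟨by omega, by omega⟩, ?_⟩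
    rw [if_neg hB, if_neg (by intro hrun; exact hC ⟨c + j, ⟨hrun.2.1, hrun.2.2⟩, by omega, rfl⟩)]
    exact hbody
  · rintro ⟨cr, hcr, hb⟩
    split_ifs at hb with hA
    simp only [List.any_eq_true, PySem.List.mem_pyRange_one] at hb
    obtain ⟨cc, hcc, hbody⟩ := hb
    split_ifs at hbody with hB hC
    refine ⟨(row, max col (min cc (col_max - 1))),
      ⟨max col (min cc (col_max - 1)), ⟨by omega, by omega⟩, rfl⟩,
      cr - row, ⟨by omega, by omega⟩,
      cc - max col (min cc (col_max - 1)), ⟨by omega, by omega⟩, ?_⟩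
    simp only
    rw [show row + (cr - row) = cr from by ring,
        show max col (min cc (col_max - 1)) + (cc - max col (min cc (col_max - 1))) = cc from by ring]
    rw [if_neg hA, if_neg hB]
    rw [if_neg (by
      simp only [PySem.Set.contains_iff, PySem.Set.mem_ofList, List.mem_map,
        PySem.List.mem_pyRange_one, Prod.mk.injEq]
      rintro ⟨a, ⟨ha1, ha2⟩, hr, hac⟩
      exact hC ⟨by omega, by omega, by omega⟩)]
    exact hbody

-- ===== VERDICT (by name: the statement is the Claim_ definition above) =====
theorem pvRunEnd_pos (rowl : List String) (width col : Int) (s : String)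
    (hwlt : col < width) (h2 : PySem.List.pyGet? rowl col = some s)
    (hd : PySem.Str.strIsdigit s = true) :
    col < pvRunEnd rowl width col (width - col).toNat := by
  obtain ⟨n, hn⟩ : ∃ n, (width - col).toNat = n + 1 := ⟨(width - col).toNat - 1, by omega⟩
  rw [hn]
  simp only [pvRunEnd, if_pos hwlt, h2]
  rw [if_pos hd]
  have := pvRunEnd_ge rowl width n (col + 1)
  omega

theorem check_next_digits_spec : Claim_equal_check_next_digits := by
  intro input cd seen hdom hpre
  obtain ⟨hne, hrect, hr1, hr2, hc1, hc2⟩ := hpre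
  unfold Spec_check_next_digits
  have h0 : PySem.List.pyGet? input 0 = some (input.headD []) := by
    cases input with
    | nil => exact absurd rfl hne
    | cons x xs => simp [PySem.List.pyGet?, PySem.List.pyIdx?]
  simp only [check_next_digits, check_next_digits_alt]
  cases h1 : PySem.List.pyGet? input cd.1 with
  | none => rfl
  | some rowl =>
    simp only
    cases h2 : PySem.List.pyGet? rowl cd.2 with
    | none => rfl
    | some s =>
      simp only
      by_cases hd : PySem.Str.strIsdigit s = true
      · simp only [hd, Bool.not_true, Bool.false_eq_true, if_false]
        rw [pvScanRun_eq]
        have hwlt : cd.2 < ((((PySem.List.pyGet? input 0).getD []).length : Nat) : Int) := by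
          rw [h0]; exact_mod_cast hc2
        rw [pv_valid_eq input cd.1 cd.2 _ (pvRunEnd_pos rowl _ cd.2 s hwlt h2 hd)]
        split <;> rename_i hvv
        · rw [hvv]
        · rw [Bool.not_eq_true] at hvv
          rw [hvv]
      · simp only [hd, Bool.not_false, if_true]
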